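-- pv_equiv track=rewrite | github.com/Luklr/RI-2025 | TP1/punto3.py | docs
-- ===== SOURCE A (Python) =====
-- def docs(doc_data: list) -> list:
--     doc_data = sorted(doc_data, key=lambda x: x["doc"])
--     docs = []
--     last_doc = -1
--     term_count = 0
--     tf_total = 0
--     for doc in doc_data:
--         if doc["doc"] != last_doc:
--             term_count = 0
--             tf_total = 0
--             docs.append({
--                 "doc": doc["doc"],
--                 "terms": term_count,
--                 "tf": tf_total
--             })
--             last_doc = doc["doc"]
--         else:
--             term_count += 1
--             tf_total += doc["tf"]
--             docs[-1]["terms"] = term_count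
--             docs[-1]["tf"] = tf_total
--
--     return docs
-- ===== SOURCE B (Python) =====
-- def docs(doc_data: list) -> list:
--     # One pass over doc_data grouping by doc id: the first time an id is seen its
--     # entry starts at zero; every repeat bumps the term count and accumulates tf.
--     # Output lists the entries by ascending doc id.
--     agg = {}
--     for doc in doc_data:
--         d = doc["doc"]
--         if d in agg:
--             entry = agg[d]
--             entry["terms"] += 1
--             entry["tf"] += doc["tf"]
--         else:
--             agg[d] = {"doc": d, "terms": 0, "tf": 0}
--     return [agg[d] for d in sorted(agg)]
-- ===== Notes on version B (the rewrite author's own statement) =====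
-- stated objective: idiomatic
-- what changed: A stable-sorts the whole list and scans it with a last_doc sentinel, mutating the last appended entry in place; B builds a dict of aggregates in one pass over the original list (first sight creates a zero entry, repeats increment) and emits the entries by sorted doc id; Pre_ excludes inputs where A raises (a missing 'doc'/'tf' key, or minimum doc id exactly -1 colliding with A's sentinel).
-- crash fix: When every dict has the needed keys but the minimum doc id is exactly -1 (colliding with A's last_doc sentinel), A raises IndexError on docs[-1]; B returns the normal aggregate list. — e.g. on docs([[("doc", -1), ("tf", 2)]]): A raises IndexError, B returns [[("doc", -1), ("terms", 0), ("tf", 0)]]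
import Mathlib
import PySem

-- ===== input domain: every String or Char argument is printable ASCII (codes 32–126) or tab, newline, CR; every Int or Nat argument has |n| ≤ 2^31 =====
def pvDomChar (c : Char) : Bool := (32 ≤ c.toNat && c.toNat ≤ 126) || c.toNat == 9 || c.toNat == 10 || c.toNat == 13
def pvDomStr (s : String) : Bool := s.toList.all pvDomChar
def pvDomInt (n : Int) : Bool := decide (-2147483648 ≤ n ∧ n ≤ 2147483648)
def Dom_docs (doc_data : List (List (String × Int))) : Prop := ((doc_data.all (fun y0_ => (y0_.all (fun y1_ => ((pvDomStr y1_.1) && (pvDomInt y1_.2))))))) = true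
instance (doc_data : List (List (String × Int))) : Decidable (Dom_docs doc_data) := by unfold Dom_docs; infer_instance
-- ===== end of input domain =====

-- B replaces A's sort-then-scan (stable sort of the whole list, sentinel last_doc, in-place
-- mutation of the last output entry) with a one-pass group-by dict over the original list,
-- emitted by ascending doc id.  Objective: idiomatic.

-- shared primitive: Python dict access d[k] (dicts arrive as assoc lists; built as a Python
-- dict, so a later duplicate key overwrites an earlier one — PySem.Dict.ofList).  The .getD 0
-- default is only reached on inputs excluded by Pre_docs (missing key = Python KeyError).
def dget (d : List (String × Int)) (k : String) : Int :=
  ((PySem.Dict.ofList d).get? k).getD 0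

def dkey (x : List (String × Int)) : Int := dget x "doc"   -- doc["doc"]
def dtf (x : List (String × Int)) : Int := dget x "tf"     -- doc["tf"]

-- ===== PORT A =====
-- docs[-1]["terms"] = t; docs[-1]["tf"] = f  (overwrite of existing keys keeps their position);
-- the .getD [] default is only reached when Python raises IndexError (excluded by Pre_docs)
def setLastA (ds : List (List (String × Int))) (t f : Int) : List (List (String × Int)) :=
  ds.dropLast ++ [(((PySem.Dict.mk (ds.getLast?.getD [])).insert "terms" t).insert "tf" f).items]

-- one iteration of A's for-loop; state = (docs, last_doc, term_count, tf_total)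
def stepA (st : List (List (String × Int)) × Int × Int × Int) (doc : List (String × Int)) :
    List (List (String × Int)) × Int × Int × Int :=
  let d := dkey doc
  if d ≠ st.2.1 then
    (st.1 ++ [[("doc", d), ("terms", (0 : Int)), ("tf", (0 : Int))]], d, 0, 0)
  else
    let tc := st.2.2.1 + 1
    let tf := st.2.2.2 + dtf doc
    (setLastA st.1 tc tf, st.2.1, tc, tf)

def docs (doc_data : List (List (String × Int))) : List (List (String × Int)) :=
  ((PySem.List.sorted doc_data (fun x => dkey x)).foldl stepA ([], -1, 0, 0)).1

-- ===== PORT B =====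
-- one iteration of B's for-loop over agg; entry mutation in Python updates the existing
-- values in place, here: overwrite-insert (keeps key positions) of the stored entry
def stepB (agg : PySem.Dict Int (List (String × Int))) (doc : List (String × Int)) :
    PySem.Dict Int (List (String × Int)) :=
  if agg.contains (dkey doc) then
    -- entry = agg[d]; the .getD [] default is unreachable under the contains-guard
    let entry := agg.getD (dkey doc) []
    agg.insert (dkey doc) ((((PySem.Dict.mk entry).insert "terms" (dget entry "terms" + 1)).insert
      "tf" (dget entry "tf" + dtf doc)).items)
  else
    agg.insert (dkey doc) [("doc", dkey doc), ("terms", (0 : Int)), ("tf", (0 : Int))]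

def docs_alt (doc_data : List (List (String × Int))) : List (List (String × Int)) :=
  let agg := doc_data.foldl stepB PySem.Dict.empty
  (PySem.List.sorted agg.keys (fun x => x)).map (fun d => agg.getD d [])

-- ===== PRECONDITION & SPEC =====
-- Pre_docs is exactly where the Python A returns: every dict has key "doc" (else KeyError in
-- the sort key), every non-first occurrence of a doc id has key "tf" (else KeyError in the
-- else-branch), and -1 is not the minimum doc id (else docs[-1] on the empty list, IndexError).
def Pre_docs (doc_data : List (List (String × Int))) : Prop :=
  (∀ d ∈ doc_data, (((PySem.Dict.ofList d).get? "doc").isSome = true)) ∧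
  doc_data.Pairwise (fun a b => dkey a = dkey b →
      ((PySem.Dict.ofList b).get? "tf").isSome = true) ∧
  (∀ d ∈ doc_data, dkey d = -1 → ∃ d' ∈ doc_data, dkey d' < -1)
instance (doc_data : List (List (String × Int))) : Decidable (Pre_docs doc_data) := by
  unfold Pre_docs; infer_instance

def pvWitness_docs : (List (List (String × Int))) :=
  [[("doc", 1), ("tf", 5)], [("doc", 0), ("tf", 3)], [("doc", 1), ("tf", 7)]]

-- When every dict has the needed keys but the minimum doc id is exactly -1 (colliding with
-- A's last_doc sentinel), A raises IndexError on docs[-1]; B returns the normal aggregate list.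
def Raises_docs (doc_data : List (List (String × Int))) : Prop :=
  (∀ d ∈ doc_data, (((PySem.Dict.ofList d).get? "doc").isSome = true)) ∧
  doc_data.Pairwise (fun a b => dkey a = dkey b →
      ((PySem.Dict.ofList b).get? "tf").isSome = true) ∧
  (∃ d ∈ doc_data, dkey d = -1 ∧ ∀ d' ∈ doc_data, -1 ≤ dkey d')
instance (doc_data : List (List (String × Int))) : Decidable (Raises_docs doc_data) := by
  unfold Raises_docs; infer_instance

def pvRaiseWitness_docs : (List (List (String × Int))) := [[("doc", -1), ("tf", 2)]]
def pvRaiseWitnessOut_docs : List (List (String × Int)) := [[("doc", -1), ("terms", 0), ("tf", 0)]]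

def Spec_docs (doc_data : List (List (String × Int))) (out : List (List (String × Int))) : Prop :=
  out = docs_alt doc_data
instance (doc_data : List (List (String × Int))) (out : List (List (String × Int))) :
    Decidable (Spec_docs doc_data out) := by unfold Spec_docs; infer_instance

-- ===== CLAIM (what is proved, stated in full; the proofs are below) =====
def Claim_equal_docs : Prop := ∀ (doc_data : List (List (String × Int))),
  Dom_docs doc_data → Pre_docs doc_data → Spec_docs doc_data (docs doc_data)
def Claim_raises_docs : Prop :=
  (∀ (doc_data : List (List (String × Int))), Dom_docs doc_data → Raises_docs doc_data →
      ¬ Pre_docs doc_data) ∧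
  (Dom_docs (pvRaiseWitness_docs) ∧ Raises_docs (pvRaiseWitness_docs) ∧
      docs_alt (pvRaiseWitness_docs) = pvRaiseWitnessOut_docs)

-- ===== LEMMAS AND PROOFS =====

-- the output entry {"doc": v, "terms": t, "tf": f}
def mkE (v t f : Int) : List (String × Int) := [("doc", v), ("terms", t), ("tf", f)]

def sumTf (g : List (List (String × Int))) : Int := (g.map dtf).sum

-- A's result on a key-sorted list, described by adjacent runs of equal keys
def runs : List (List (String × Int)) → List (List (String × Int))
  | [] => []
  | x :: xs =>
    mkE (dkey x) ((xs.takeWhile (fun y => dkey y == dkey x)).length : Int)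
        (sumTf (xs.takeWhile (fun y => dkey y == dkey x)))
      :: runs (xs.dropWhile (fun y => dkey y == dkey x))
  termination_by l => l.length
  decreasing_by simp; exact List.length_dropWhile_le _ xs

-- the aggregate entry for doc id v over list dd (what both programs produce for id v)
def bentry (dd : List (List (String × Int))) (v : Int) : List (String × Int) :=
  mkE v (((dd.filter (fun doc => dkey doc == v)).length : Int) - 1)
    (sumTf ((dd.filter (fun doc => dkey doc == v)).drop 1))

-- B's accumulated dict after the pass
def aggB (dd : List (List (String × Int))) : PySem.Dict Int (List (String × Int)) :=
  dd.foldl stepB PySem.Dict.empty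

-- the in-place mutation of A's last entry, on the shape the loop maintains
theorem setLastA_concat (ds : List (List (String × Int))) (v t0 f0 t f : Int) :
    setLastA (ds ++ [mkE v t0 f0]) t f = ds ++ [mkE v t f] := by
  unfold setLastA mkE
  rw [List.dropLast_concat, List.getLast?_concat]
  rfl

-- the repeat-branch rewrite of a stored entry, on the shape the loop maintains
theorem stepB_entry (v t f x1 x2 : Int) :
    (((PySem.Dict.mk (mkE v t f)).insert "terms" (dget (mkE v t f) "terms" + x1)).insert
      "tf" (dget (mkE v t f) "tf" + x2)).items = mkE v (t + x1) (f + x2) := by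
  rfl

-- INVARIANT of B's fold: the dict maps each id occurring in dd to its aggregate entry
theorem get_aggB (dd : List (List (String × Int))) (v : Int) :
    (aggB dd).get? v = if dd.filter (fun doc => dkey doc == v) = [] then none
      else some (bentry dd v) := by
  induction dd using List.reverseRecOn with
  | nil => simp [aggB, PySem.Dict.get?_empty]
  | append_singleton dd x ih =>
    have hstep : aggB (dd ++ [x]) = stepB (aggB dd) x := by
      unfold aggB; rw [List.foldl_append]; rfl
    by_cases hv : dkey x = v
    · -- insertion happens at key v
      have hcont : (aggB dd).contains (dkey x) = ((aggB dd).get? (dkey x)).isSome :=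
        PySem.Dict.contains_eq_isSome_get? _ _
      by_cases hnil : dd.filter (fun doc => dkey doc == v) = []
      · -- first occurrence of v: fresh entry
        have hnone : (aggB dd).get? (dkey x) = none := by rw [hv, ih, if_pos hnil]
        have hB : stepB (aggB dd) x
            = (aggB dd).insert (dkey x) (mkE (dkey x) 0 0) := by
          unfold stepB
          rw [hcont, hnone]
          rfl
        have hfil : (dd ++ [x]).filter (fun doc => dkey doc == v) = [x] := by
          rw [List.filter_append, hnil]
          simp [hv]
        rw [hstep, hB, hv, PySem.Dict.get?_insert_self, if_neg (by simp [hfil])]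
        unfold bentry
        rw [hfil]
        simp [sumTf]
      · -- repeat: increment the stored entry
        have hsome : (aggB dd).get? (dkey x) = some (bentry dd v) := by
          rw [hv, ih, if_neg hnil]
        have hgetD : (aggB dd).getD (dkey x) [] = bentry dd v :=
          PySem.Dict.getD_of_get?_eq_some _ _ hsome
        have hB : stepB (aggB dd) x
            = (aggB dd).insert (dkey x)
                (mkE v ((((dd.filter (fun doc => dkey doc == v)).length : Int) - 1) + 1)
                  (sumTf ((dd.filter (fun doc => dkey doc == v)).drop 1) + dtf x)) := by
          unfold stepB
          rw [hcont, hsome]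
          simp only [Option.isSome_some, if_true, hgetD]
          unfold bentry
          rw [stepB_entry]
        obtain ⟨g0, gs, hg⟩ : ∃ g0 gs, dd.filter (fun doc => dkey doc == v) = g0 :: gs := by
          cases h : dd.filter (fun doc => dkey doc == v) with
          | nil => exact absurd h hnil
          | cons a as => exact ⟨a, as, rfl⟩
        have hfil : (dd ++ [x]).filter (fun doc => dkey doc == v)
            = (g0 :: gs) ++ [x] := by
          rw [List.filter_append, hg]
          simp [hv]
        rw [hstep, hB, hv, PySem.Dict.get?_insert_self, if_neg (by simp [hfil])]
        unfold bentry
        rw [hfil, hg]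
        simp [sumTf, mkE]
    · -- other keys untouched
      have hfil : (dd ++ [x]).filter (fun doc => dkey doc == v)
          = dd.filter (fun doc => dkey doc == v) := by
        rw [List.filter_append]
        simp [hv]
      have hne : v ≠ dkey x := fun h => hv h.symm
      have : (stepB (aggB dd) x).get? v = (aggB dd).get? v := by
        unfold stepB
        by_cases hc : (aggB dd).contains (dkey x) = true <;>
          simp [hc, PySem.Dict.get?_insert_of_ne _ _ hne]
      rw [hstep, this, ih, hfil]
      unfold bentry
      rw [hfil]

theorem nodup_keys_aggB (dd : List (List (String × Int))) : (aggB dd).keys.Nodup := by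
  induction dd using List.reverseRecOn with
  | nil => exact PySem.Dict.nodup_keys_empty
  | append_singleton dd x ih =>
    have hstep : aggB (dd ++ [x]) = stepB (aggB dd) x := by
      unfold aggB; rw [List.foldl_append]; rfl
    rw [hstep]
    unfold stepB
    by_cases hc : (aggB dd).contains (dkey x) = true <;>
      simp [hc, PySem.Dict.nodup_keys_insert _ _ _ ih]

theorem mem_keys_aggB (dd : List (List (String × Int))) (v : Int) :
    v ∈ (aggB dd).keys ↔ v ∈ dd.map dkey := by
  rw [← PySem.Dict.contains_iff_mem_keys, PySem.Dict.contains_eq_isSome_get?, get_aggB]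
  by_cases h : dd.filter (fun doc => dkey doc == v) = []
  · rw [if_pos h]
    constructor
    · intro hh; simp at hh
    · intro hv
      rcases List.mem_map.mp hv with ⟨y, hy, rfl⟩
      have : y ∈ dd.filter (fun doc => dkey doc == dkey y) :=
        List.mem_filter.mpr ⟨hy, by simp⟩
      rw [h] at this
      exact absurd this (List.not_mem_nil)
  · rw [if_neg h]
    simp only [Option.isSome_some, true_iff]
    obtain ⟨a, ha⟩ := List.exists_mem_of_ne_nil _ h
    rcases List.mem_filter.mp ha with ⟨hadd, hav⟩
    simp at hav
    exact hav ▸ List.mem_map_of_mem hadd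

-- A's fold over a key-sorted tail whose keys are all ≥ L, starting inside the run of L
theorem foldA_run (s : List (List (String × Int))) :
    ∀ (ds0 : List (List (String × Int))) (L t f : Int),
    s.Pairwise (fun a b => dkey a ≤ dkey b) → (∀ y ∈ s, L ≤ dkey y) →
    (s.foldl stepA (ds0 ++ [mkE L t f], L, t, f)).1
      = ds0 ++ mkE L (t + ((s.takeWhile (fun y => dkey y == L)).length : Int))
            (f + sumTf (s.takeWhile (fun y => dkey y == L)))
          :: runs (s.dropWhile (fun y => dkey y == L)) := by
  induction s with
  | nil => intro ds0 L t f _ _; simp [runs, sumTf, mkE]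
  | cons x xs ih =>
    intro ds0 L t f hp hlb
    rcases List.pairwise_cons.mp hp with ⟨hx, hp'⟩
    by_cases hxL : dkey x = L
    · have hstep : stepA (ds0 ++ [mkE L t f], L, t, f) x
          = (ds0 ++ [mkE L (t + 1) (f + dtf x)], L, t + 1, f + dtf x) := by
        simp [stepA, hxL, setLastA_concat]
      rw [List.foldl_cons, hstep,
        ih (ds0) L (t + 1) (f + dtf x) hp' (fun y hy => hlb y (List.mem_cons_of_mem _ hy))]
      simp [hxL, sumTf, mkE]
      omega
    · have hlt : L < dkey x :=
        lt_of_le_of_ne (hlb x (List.mem_cons_self)) (fun h => hxL h.symm)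
      have hstep : stepA (ds0 ++ [mkE L t f], L, t, f) x
          = ((ds0 ++ [mkE L t f]) ++ [mkE (dkey x) 0 0], dkey x, 0, 0) := by
        simp [stepA, mkE, fun h : dkey x = L => hxL h]
      rw [List.foldl_cons, hstep,
        ih (ds0 ++ [mkE L t f]) (dkey x) 0 0 hp' hx]
      have htw : (x :: xs).takeWhile (fun y => dkey y == L) = [] := by
        simp [hxL]
      have hdw : (x :: xs).dropWhile (fun y => dkey y == L) = x :: xs := by
        simp [hxL]
      rw [htw, hdw, runs]
      simp [sumTf, mkE]

-- contiguity of an equal-key run at the minimum, in a key-sorted list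
theorem take_eq_filter (xs : List (List (String × Int))) (m : Int)
    (hp : xs.Pairwise (fun a b => dkey a ≤ dkey b)) (hlb : ∀ y ∈ xs, m ≤ dkey y) :
    xs.takeWhile (fun y => dkey y == m) = xs.filter (fun y => dkey y == m) := by
  induction xs with
  | nil => rfl
  | cons y ys ih =>
    rcases List.pairwise_cons.mp hp with ⟨hy, hp'⟩
    by_cases hym : dkey y = m
    · simp [hym,
        ih hp' (fun z hz => hlb z (List.mem_cons_of_mem _ hz))]
    · have hgt : m < dkey y := lt_of_le_of_ne (hlb y List.mem_cons_self) (fun h => hym h.symm)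
      have hnil : ys.filter (fun z => dkey z == m) = [] := by
        apply List.filter_eq_nil_iff.mpr
        intro z hz
        have : dkey y ≤ dkey z := hy z hz
        simp; omega
      simp [hym, hnil]

theorem drop_eq_filter (xs : List (List (String × Int))) (m : Int)
    (hp : xs.Pairwise (fun a b => dkey a ≤ dkey b)) (hlb : ∀ y ∈ xs, m ≤ dkey y) :
    xs.dropWhile (fun y => dkey y == m) = xs.filter (fun y => !(dkey y == m)) := by
  induction xs with
  | nil => rfl
  | cons y ys ih =>
    rcases List.pairwise_cons.mp hp with ⟨hy, hp'⟩
    by_cases hym : dkey y = m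
    · simp [hym,
        ih hp' (fun z hz => hlb z (List.mem_cons_of_mem _ hz))]
    · have hgt : m < dkey y := lt_of_le_of_ne (hlb y List.mem_cons_self) (fun h => hym h.symm)
      have hself : ys.filter (fun z => !(dkey z == m)) = ys := by
        apply List.filter_eq_self.mpr
        intro z hz
        have : dkey y ≤ dkey z := hy z hz
        simp; omega
      simp [hym, hself]

-- filtering commutes with one insertion step of the stable insertion sort
theorem insertBy_filter (p : List (String × Int) → Bool) (x : List (String × Int))
    (ys : List (List (String × Int))) (hp : ys.Pairwise (fun a b => dkey a ≤ dkey b)) :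
    (PySem.List.insertBy (fun a b => decide (dkey a < dkey b)) x ys).filter p
      = if p x then PySem.List.insertBy (fun a b => decide (dkey a < dkey b)) x (ys.filter p)
        else ys.filter p := by
  induction ys with
  | nil => by_cases hpx : p x <;> simp [PySem.List.insertBy, hpx]
  | cons y ys ih =>
    rcases List.pairwise_cons.mp hp with ⟨hy, hp'⟩
    by_cases hlt : dkey x < dkey y
    · have hall : ∀ z ∈ (y :: ys).filter p, dkey x < dkey z := by
        intro z hz
        rcases List.mem_filter.mp hz with ⟨hz, _⟩
        rcases List.mem_cons.mp hz with h | h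
        · exact h ▸ hlt
        · exact lt_of_lt_of_le hlt (hy z h)
      have hins : PySem.List.insertBy (fun a b => decide (dkey a < dkey b)) x
          ((y :: ys).filter p) = x :: (y :: ys).filter p := by
        cases hfy : (y :: ys).filter p with
        | nil => simp [PySem.List.insertBy]
        | cons z zs =>
          have : dkey x < dkey z := hall z (hfy ▸ List.mem_cons_self)
          simp [PySem.List.insertBy, this]
      rw [show PySem.List.insertBy (fun a b => decide (dkey a < dkey b)) x (y :: ys)
            = x :: y :: ys by simp [PySem.List.insertBy, hlt], List.filter_cons]
      by_cases hpx : p x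
      · simp only [hpx, if_true]
        exact hins.symm
      · simp [hpx]
    · rw [show PySem.List.insertBy (fun a b => decide (dkey a < dkey b)) x (y :: ys)
            = y :: PySem.List.insertBy (fun a b => decide (dkey a < dkey b)) x ys by
          simp [PySem.List.insertBy, hlt]]
      by_cases hpy : p y
      · by_cases hpx : p x
        · simp [hpy, hpx, ih hp',
            show PySem.List.insertBy (fun a b => decide (dkey a < dkey b)) x
              (y :: ys.filter p) = y :: PySem.List.insertBy (fun a b => decide (dkey a < dkey b))
                x (ys.filter p) from by simp [PySem.List.insertBy, hlt]]
        · simp [hpy, hpx, ih hp']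
      · by_cases hpx : p x <;> simp [hpy, hpx, ih hp']

-- STABILITY: filtering commutes with the stable sort
theorem sorted_filter (dd : List (List (String × Int))) (p : List (String × Int) → Bool) :
    (PySem.List.sorted dd (fun x => dkey x)).filter p
      = PySem.List.sorted (dd.filter p) (fun x => dkey x) := by
  induction dd using List.reverseRecOn with
  | nil => rfl
  | append_singleton dd a ih =>
    have hstep : ∀ (l : List (List (String × Int))),
        PySem.List.sorted (l ++ [a]) (fun x => dkey x)
          = PySem.List.insertBy (fun u v => decide (dkey u < dkey v)) a
              (PySem.List.sorted l (fun x => dkey x)) := by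
      intro l
      rw [PySem.List.sorted_eq_foldl_insertBy, PySem.List.sorted_eq_foldl_insertBy,
        List.foldl_append]
      rfl
    rw [hstep, insertBy_filter p a _ (PySem.List.sorted_pairwise dd (fun x => dkey x)),
      List.filter_append, ih]
    by_cases hpa : p a
    · simp [hpa, hstep]
    · simp [hpa]

-- two Nodup Int lists with the same members sort (ascending, key = id) to the same list
theorem sortedNodup_congr (l1 l2 : List Int) (h1 : l1.Nodup) (h2 : l2.Nodup)
    (h : ∀ v, v ∈ l1 ↔ v ∈ l2) :
    PySem.List.sorted l1 (fun x => x) = PySem.List.sorted l2 (fun x => x) := by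
  have hperm : l1.Perm l2 := (List.perm_ext_iff_of_nodup h1 h2).mpr h
  apply PySem.List.sorted_eq_of_perm_of_pairwise_lt
  · exact List.Perm.trans (PySem.List.sorted_perm _ _ _) hperm.symm
  · have hle : (PySem.List.sorted l2 (fun x => x)).Pairwise (fun a b => a ≤ b) :=
      PySem.List.sorted_pairwise l2 (fun x => x)
    have hnd : (PySem.List.sorted l2 (fun x => x)).Nodup :=
      (PySem.List.sorted_perm l2 _ _).nodup_iff.mpr h2
    exact (List.Pairwise.and (S := fun a b => a ≠ b) hle hnd).imp
      (fun h => lt_of_le_of_ne h.1 h.2)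

-- sorted(set(l1)) = sorted(set(l2)) when l1 and l2 have the same elements
theorem sortedKeys_congr (l1 l2 : List Int) (h : ∀ v, v ∈ l1 ↔ v ∈ l2) :
    PySem.List.sorted (PySem.Set.ofList l1) (fun x => x)
      = PySem.List.sorted (PySem.Set.ofList l2) (fun x => x) :=
  sortedNodup_congr _ _ (PySem.Set.nodup_ofList l1) (PySem.Set.nodup_ofList l2)
    (fun v => by rw [PySem.Set.mem_ofList, PySem.Set.mem_ofList]; exact h v)

-- peeling the minimal doc id off the sorted distinct keys
theorem sortedKeys_min_cons (s : List (List (String × Int))) (m : Int)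
    (hmem : m ∈ s.map (fun y => dkey y)) (hmin : ∀ y ∈ s, m ≤ dkey y) :
    PySem.List.sorted (PySem.Set.ofList (s.map (fun y => dkey y))) (fun x => x)
      = m :: PySem.List.sorted (PySem.Set.ofList
          ((s.filter (fun y => !(dkey y == m))).map (fun y => dkey y))) (fun x => x) := by
  have hlt : ∀ w ∈ PySem.List.sorted (PySem.Set.ofList
      ((s.filter (fun y => !(dkey y == m))).map (fun y => dkey y))) (fun x => x), m < w := by
    intro w hw
    rw [PySem.List.mem_sorted, PySem.Set.mem_ofList, List.mem_map] at hw
    rcases hw with ⟨y, hy, rfl⟩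
    rcases List.mem_filter.mp hy with ⟨hys, hne⟩
    have := hmin y hys
    simp at hne
    omega
  apply PySem.List.sorted_eq_of_perm_of_pairwise_lt
  · rw [List.perm_ext_iff_of_nodup ?_ (PySem.Set.nodup_ofList _)]
    · intro v
      rw [PySem.Set.mem_ofList]
      constructor
      · intro hv
        rcases List.mem_cons.mp hv with rfl | hv
        · exact hmem
        · rw [PySem.List.mem_sorted, PySem.Set.mem_ofList, List.mem_map] at hv
          rcases hv with ⟨y, hy, rfl⟩
          exact List.mem_map_of_mem (List.mem_of_mem_filter hy)
      · intro hv
        rcases List.mem_map.mp hv with ⟨y, hy, rfl⟩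
        by_cases hym : dkey y = m
        · exact hym ▸ List.mem_cons_self
        · refine List.mem_cons_of_mem _ ?_
          rw [PySem.List.mem_sorted, PySem.Set.mem_ofList]
          refine List.mem_map_of_mem (List.mem_filter.mpr ⟨hy, by simp [hym]⟩)
    · refine List.nodup_cons.mpr ⟨fun hm => ?_, ?_⟩
      · exact absurd (hlt m hm) (lt_irrefl m)
      · exact (PySem.List.sorted_perm _ _ _).nodup_iff.mpr (PySem.Set.nodup_ofList _)
  · refine List.pairwise_cons.mpr ⟨hlt, PySem.List.sorted_ofList_pairwise_lt _⟩

-- runs of a key-sorted list = the group-by over that list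
theorem runs_eq (n : Nat) : ∀ (s : List (List (String × Int))), s.length ≤ n →
    s.Pairwise (fun a b => dkey a ≤ dkey b) →
    runs s = (PySem.List.sorted (PySem.Set.ofList (s.map (fun y => dkey y)))
        (fun x => x)).map (bentry s) := by
  induction n with
  | zero =>
    intro s hlen _
    rw [List.length_eq_zero_iff.mp (Nat.le_zero.mp hlen)]
    simp [runs, PySem.Set.ofList_nil, (PySem.List.sorted_eq_nil_iff ([] : List Int)
      (fun x => x) false).mpr rfl]
  | succ n ih =>
    intro s hlen hp
    cases s with
    | nil =>
      simp [runs, PySem.Set.ofList_nil, (PySem.List.sorted_eq_nil_iff ([] : List Int)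
        (fun x => x) false).mpr rfl]
    | cons x xs =>
      rcases List.pairwise_cons.mp hp with ⟨hx, hp'⟩
      have hmin : ∀ y ∈ x :: xs, dkey x ≤ dkey y := by
        intro y hy
        rcases List.mem_cons.mp hy with rfl | hy
        · exact le_refl _
        · exact hx y hy
      have htake : xs.takeWhile (fun y => dkey y == dkey x)
          = xs.filter (fun y => dkey y == dkey x) :=
        take_eq_filter xs (dkey x) hp' hx
      have hdrop : xs.dropWhile (fun y => dkey y == dkey x)
          = xs.filter (fun y => !(dkey y == dkey x)) :=
        drop_eq_filter xs (dkey x) hp' hx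
      have hxsf : (x :: xs).filter (fun y => !(dkey y == dkey x))
          = xs.filter (fun y => !(dkey y == dkey x)) := by
        simp
      have hlen' : (xs.filter (fun y => !(dkey y == dkey x))).length ≤ n := by
        have := List.length_filter_le (fun y => !(dkey y == dkey x)) xs
        simp at hlen
        omega
      have hIH := ih (xs.filter (fun y => !(dkey y == dkey x))) hlen'
        (List.Pairwise.sublist List.filter_sublist hp')
      rw [runs, htake, hdrop, hIH, sortedKeys_min_cons (x :: xs) (dkey x)
        (List.mem_map_of_mem List.mem_cons_self) hmin, hxsf]
      rw [List.map_cons]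
      congr 1
      · -- head entry: bentry (x :: xs) (dkey x) is the run at the minimum
        have hgrp : (x :: xs).filter (fun y => dkey y == dkey x)
            = x :: xs.filter (fun y => dkey y == dkey x) := by
          simp
        unfold bentry mkE
        rw [hgrp]
        simp [sumTf]
      · -- tail entries: groups of other ids are untouched by removing the run of dkey x
        apply List.map_congr_left
        intro w hw
        have hwm : dkey x < w := by
          rw [PySem.List.mem_sorted, PySem.Set.mem_ofList, List.mem_map] at hw
          rcases hw with ⟨y, hy, rfl⟩
          rcases List.mem_filter.mp hy with ⟨hys, hne⟩
          have := hx y hys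
          simp at hne
          omega
        have hfil : (xs.filter (fun y => !(dkey y == dkey x))).filter
            (fun doc => dkey doc == w) = (x :: xs).filter (fun doc => dkey doc == w) := by
          rw [List.filter_filter]
          rw [show (x :: xs).filter (fun doc => dkey doc == w)
              = xs.filter (fun doc => dkey doc == w) from by
            simp [List.filter_cons]; omega]
          apply List.filter_congr
          intro a _
          by_cases haw : dkey a = w
          · simp [haw]; omega
          · simp [haw]
        unfold bentry
        rw [hfil]

-- every member of a one-id group has that id, so the group is trivially key-sorted
theorem filter_key_sorted (dd : List (List (String × Int))) (v : Int) :
    PySem.List.sorted (dd.filter (fun doc => dkey doc == v)) (fun x => dkey x)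
      = dd.filter (fun doc => dkey doc == v) := by
  apply PySem.List.sorted_eq_self_of_pairwise
  apply List.pairwise_of_forall_mem_list
  intro a ha b hb
  have ha' := (List.mem_filter.mp ha).2
  have hb' := (List.mem_filter.mp hb).2
  simp at ha' hb'
  omega

-- the aggregate entries are the same over the original list as over the sorted one (stability)
theorem bentry_sorted (dd : List (List (String × Int))) (v : Int) :
    bentry (PySem.List.sorted dd (fun x => dkey x)) v = bentry dd v := by
  unfold bentry
  rw [sorted_filter dd (fun doc => dkey doc == v), filter_key_sorted dd v]

-- B's port, written as the group-by map over the sorted distinct doc ids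
theorem docs_alt_eq (dd : List (List (String × Int))) :
    docs_alt dd = (PySem.List.sorted (PySem.Set.ofList (dd.map (fun doc => dkey doc)))
      (fun x => x)).map (bentry dd) := by
  show (PySem.List.sorted (aggB dd).keys (fun x => x)).map (fun d => (aggB dd).getD d [])
    = _
  rw [sortedNodup_congr (aggB dd).keys (PySem.Set.ofList (dd.map (fun doc => dkey doc)))
    (nodup_keys_aggB dd) (PySem.Set.nodup_ofList _)
    (by intro v; rw [mem_keys_aggB, PySem.Set.mem_ofList])]
  apply List.map_congr_left
  intro w hw
  have hwmem : w ∈ dd.map dkey := by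
    rw [PySem.List.mem_sorted, PySem.Set.mem_ofList] at hw
    exact hw
  have hnil : dd.filter (fun doc => dkey doc == w) ≠ [] := by
    rcases List.mem_map.mp hwmem with ⟨y, hy, rfl⟩
    intro h
    have : y ∈ dd.filter (fun doc => dkey doc == dkey y) :=
      List.mem_filter.mpr ⟨hy, by simp⟩
    rw [h] at this
    exact absurd this (List.not_mem_nil)
  have := get_aggB dd w
  rw [if_neg hnil] at this
  exact PySem.Dict.getD_of_get?_eq_some _ _ this

-- ===== VERDICT =====
theorem docs_spec : Claim_equal_docs := by
  unfold Claim_equal_docs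
  intro dd _ hpre
  unfold Spec_docs
  rcases hpre with ⟨h1, h2, h3⟩
  cases hs : PySem.List.sorted dd (fun x => dkey x) with
  | nil =>
    have hdd : dd = [] := (PySem.List.sorted_eq_nil_iff dd _ _).mp hs
    subst hdd
    rfl
  | cons x xs =>
    have hxdd : x ∈ dd := (PySem.List.mem_sorted dd _ _ x).mp (hs ▸ List.mem_cons_self)
    have hx1 : dkey x ≠ -1 := by
      intro h
      rcases h3 x hxdd h with ⟨d', hd', hlt⟩
      have := PySem.List.key_head_sorted_le dd (fun x => dkey x) hs d' hd'
      simp at this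
      omega
    have hpair : (x :: xs).Pairwise (fun a b => dkey a ≤ dkey b) := by
      have := PySem.List.sorted_pairwise dd (fun x => dkey x)
      rw [hs] at this
      exact this
    rcases List.pairwise_cons.mp hpair with ⟨hx, hp'⟩
    have hstep : stepA ([], -1, 0, 0) x = ([] ++ [mkE (dkey x) 0 0], dkey x, 0, 0) := by
      simp [stepA, hx1, mkE]
    have hperm : (x :: xs).Perm dd := hs ▸ PySem.List.sorted_perm dd _ _
    calc docs dd = ((x :: xs).foldl stepA ([], -1, 0, 0)).1 := by rw [docs, hs]
      _ = runs (x :: xs) := by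
          rw [List.foldl_cons, hstep, foldA_run xs [] (dkey x) 0 0 hp' hx, runs]
          simp
      _ = (PySem.List.sorted (PySem.Set.ofList ((x :: xs).map (fun y => dkey y)))
            (fun y => y)).map (bentry (x :: xs)) :=
          runs_eq (x :: xs).length (x :: xs) (le_refl _) hpair
      _ = (PySem.List.sorted (PySem.Set.ofList (dd.map (fun y => dkey y)))
            (fun y => y)).map (bentry dd) := by
          rw [sortedKeys_congr ((x :: xs).map (fun y => dkey y)) (dd.map (fun y => dkey y))
            (fun v => List.Perm.mem_iff (hperm.map _))]
          apply List.map_congr_left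
          intro w _
          rw [← bentry_sorted dd w, hs]
      _ = docs_alt dd := (docs_alt_eq dd).symm

@[simp] theorem docs_raises : Claim_raises_docs := by
  unfold Claim_raises_docs
  constructor
  · intro dd _ hr hpre
    rcases hr with ⟨_, _, d, hd, heq, hall⟩
    rcases hpre.2.2 d hd heq with ⟨d', hd', hlt⟩
    have := hall d' hd'
    omega
  · exact ⟨by decide, by decide, by decide⟩
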